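-- pv_equiv track=rewrite | github.com/MnStan/ChatBot | ChatBot/PythonFiles/LevianPythonScript.py | levenshtein_distance_replacement
-- ===== SOURCE A (Python) =====
-- def levenshtein_distance_replacement(str1, str2):
--     n_m = [[0 for j in range(len(str2) + 1)] for i in range(len(str1) + 1)]
--     for i in range(len(str1) + 1):
--         for j in range(len(str2) + 1):
--             if i == 0:
--                 n_m[i][j] = j
--             elif j == 0:
--                 n_m[i][j] = i
--             else:
--                 if str1[i - 1] == str2[j - 1]:
--                     n_m[i][j] = n_m[i - 1][j - 1]
--                 else:
--                     n_m[i][j] = n_m[i - 1][j - 1] + 1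
--     return n_m[-1][-1]
-- ===== SOURCE B (Python) =====
-- def levenshtein_distance_replacement(str1, str2):
--     # Single pass: length difference plus mismatches when aligning the strings at their ends.
--     return abs(len(str1) - len(str2)) + sum(
--         a != b for a, b in zip(reversed(str1), reversed(str2))
--     )
-- ===== Notes on version B (the rewrite author's own statement) =====
-- stated objective: faster
-- what changed: Replaced the (n+1)x(m+1) DP table (whose recurrence only ever follows the diagonal) by a closed-form single pass: |len difference| plus the count of mismatching characters when the two strings are aligned at their right ends.
import Mathlib
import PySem

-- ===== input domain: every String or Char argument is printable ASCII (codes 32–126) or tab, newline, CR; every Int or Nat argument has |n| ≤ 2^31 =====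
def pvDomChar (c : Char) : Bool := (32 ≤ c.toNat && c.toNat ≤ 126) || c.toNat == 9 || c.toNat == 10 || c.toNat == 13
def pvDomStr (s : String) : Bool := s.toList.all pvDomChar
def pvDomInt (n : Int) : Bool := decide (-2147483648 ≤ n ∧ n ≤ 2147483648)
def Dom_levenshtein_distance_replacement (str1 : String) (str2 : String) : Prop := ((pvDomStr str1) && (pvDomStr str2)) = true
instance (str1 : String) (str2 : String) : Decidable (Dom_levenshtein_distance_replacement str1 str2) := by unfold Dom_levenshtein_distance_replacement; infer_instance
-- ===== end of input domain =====

-- B replaces A's full DP table by a single right-aligned pass over the two strings.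

-- ===== PORT A =====
-- one inner-loop step of A: 'n_m[i][j] = ...'; in A every index is in range, so the
-- pyGetD/pySetD defaults never fire
def pvInner (str1 str2 : String) (i : Int) (M : List (List Int)) (j : Int) : List (List Int) :=
  let v : Int :=
    if i == 0 then j
    else if j == 0 then i
    else
      if PySem.Str.pyGet? str1 (i - 1) == PySem.Str.pyGet? str2 (j - 1) then
        PySem.List.pyGetD (PySem.List.pyGetD M (i - 1) []) (j - 1) 0
      else
        PySem.List.pyGetD (PySem.List.pyGetD M (i - 1) []) (j - 1) 0 + 1
  PySem.List.pySetD M i (PySem.List.pySetD (PySem.List.pyGetD M i []) j v)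

-- n_m[-1][-1] at the end: n_m and its rows are never empty, so the defaults never fire
def levenshtein_distance_replacement (str1 : String) (str2 : String) : Int :=
  let n_m0 : List (List Int) :=
    (PySem.List.pyRange 0 (PySem.Str.len str1 + 1) 1).map
      (fun _ => (PySem.List.pyRange 0 (PySem.Str.len str2 + 1) 1).map (fun _ => (0 : Int)))
  let n_m :=
    (PySem.List.pyRange 0 (PySem.Str.len str1 + 1) 1).foldl
      (fun M i => (PySem.List.pyRange 0 (PySem.Str.len str2 + 1) 1).foldl (pvInner str1 str2 i) M)
      n_m0
  PySem.List.pyGetD (PySem.List.pyGetD n_m (-1) []) (-1) 0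

-- ===== PORT B =====
def levenshtein_distance_replacement_alt (str1 : String) (str2 : String) : Int :=
  |(PySem.Str.len str1 - PySem.Str.len str2)| +
    (List.zip str1.toList.reverse str2.toList.reverse).foldl
      (fun acc p => acc + (if p.1 ≠ p.2 then (1 : Int) else 0)) 0

-- ===== PRECONDITION & SPEC =====
def Spec_levenshtein_distance_replacement (str1 : String) (str2 : String) (out : Int) : Prop := out = levenshtein_distance_replacement_alt str1 str2
instance (str1 : String) (str2 : String) (out : Int) : Decidable (Spec_levenshtein_distance_replacement str1 str2 out) := by unfold Spec_levenshtein_distance_replacement; infer_instance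

-- ===== CLAIM (what is proved, stated in full; the proofs are below) =====
def Claim_equal_levenshtein_distance_replacement : Prop := ∀ (str1 : String) (str2 : String), Dom_levenshtein_distance_replacement str1 str2 → Spec_levenshtein_distance_replacement str1 str2 (levenshtein_distance_replacement str1 str2)

-- ===== LEMMAS AND PROOFS =====

-- the value A's recurrence assigns at cell (i, j)
def pvCell (str1 str2 : String) : Nat → Nat → Int
  | 0, j => (j : Int)
  | i + 1, 0 => ((i : Int) + 1)
  | i + 1, j + 1 =>
      pvCell str1 str2 i j +
        (if PySem.Str.pyGet? str1 (i : Int) == PySem.Str.pyGet? str2 (j : Int) then 0 else 1)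

-- row i of the finished table
def pvRowSpec (str1 str2 : String) (i nb : Nat) : List Int :=
  (List.range (nb + 1)).map (fun j => pvCell str1 str2 i j)

-- closed form for a cell of A's table
lemma pvCell_closed (str1 str2 : String) :
    ∀ i j : Nat, i ≤ str1.toList.length → j ≤ str2.toList.length →
      pvCell str1 str2 i j
        = |(i : Int) - (j : Int)| +
            ((List.zip ((str1.toList.take i).reverse) ((str2.toList.take j).reverse)).map
              (fun p => if p.1 ≠ p.2 then (1 : Int) else 0)).sum := by
  intro i
  induction i with
  | zero =>
    intro j _ _
    simp [pvCell]
  | succ i ih =>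
    intro j hi hj
    cases j with
    | zero =>
      simp [pvCell]
      rw [abs_of_nonneg (by positivity)]
    | succ j =>
      have hi' : i < str1.toList.length := hi
      have hj' : j < str2.toList.length := hj
      have h1 : str1.toList[i]? = some str1.toList[i] := List.getElem?_eq_getElem hi'
      have h2 : str2.toList[j]? = some str2.toList[j] := List.getElem?_eq_getElem hj'
      rw [List.take_add_one, List.take_add_one, h1, h2]
      have habs : ((i + 1 : Nat) : Int) - ((j + 1 : Nat) : Int) = (i : Int) - (j : Int) := by
        push_cast; ring
      simp only [pvCell, Option.toList_some, List.reverse_append, List.reverse_singleton,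
        List.singleton_append, List.zip_cons_cons, List.map_cons, List.sum_cons, habs]
      rw [ih j (le_of_lt hi') (le_of_lt hj')]
      have hc : (PySem.Str.pyGet? str1 (i : Int) == PySem.Str.pyGet? str2 (j : Int))
          = (str1.toList[i] == str2.toList[j]) := by
        simp [h1, h2]
      rw [hc]
      by_cases hab : str1.toList[i] = str2.toList[j] <;> simp [hab]
      ring

-- the inner loop fills row i cell by cell
lemma pvInner_fold (str1 str2 : String) (nb : Nat) (i : Nat) (M : List (List Int))
    (hi : i < M.length)
    (hprev : 1 ≤ i → PySem.List.pyGetD M ((i : Int) - 1) [] = pvRowSpec str1 str2 (i - 1) nb)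
    (hlen : (PySem.List.pyGetD M (i : Int) []).length = nb + 1) :
    ∀ k : Nat, k ≤ nb + 1 →
      (PySem.List.pyRange 0 (k : Int) 1).foldl (pvInner str1 str2 (i : Int)) M
        = M.set i ((List.range k).map (fun j => pvCell str1 str2 i j)
            ++ (PySem.List.pyGetD M (i : Int) []).drop k) := by
  intro k
  induction k with
  | zero =>
    intro _
    simp [PySem.List.pyRange_one_eq_nil, List.getElem?_eq_getElem hi, List.set_getElem_self]
  | succ k ihk =>
    intro hk1
    have hk : k ≤ nb + 1 := Nat.le_of_succ_le hk1
    have hkc : ((k + 1 : Nat) : Int) = (k : Int) + 1 := by push_cast; ring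
    rw [hkc, PySem.List.pyRange_one_succ_right (by positivity), List.foldl_append, ihk hk]
    set row := PySem.List.pyGetD M (i : Int) [] with hrow
    set pre := (List.range k).map (fun j => pvCell str1 str2 i j) with hpre
    have hprelen : pre.length = k := by simp [hpre]
    have hkrow : k < row.length := by omega
    have hdrop : row.drop k = row[k] :: row.drop (k + 1) := List.drop_eq_getElem_cons hkrow
    -- the state after the first k steps
    set S := M.set i (pre ++ row.drop k) with hS
    simp only [List.foldl_cons, List.foldl_nil]
    -- value read back from row i of S
    have hSrow : PySem.List.pyGetD S (i : Int) [] = pre ++ row.drop k := by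
      simp [hS, List.getElem_set_self, hi]
    -- the value that this step writes is pvCell i k
    have hv : pvInner str1 str2 (i : Int) S (k : Int)
        = PySem.List.pySetD S (i : Int)
            (PySem.List.pySetD (pre ++ row.drop k) (k : Int) (pvCell str1 str2 i k)) := by
      rw [pvInner]
      rw [hSrow]
      congr 1
      congr 1
      -- v = pvCell i k
      cases i with
      | zero => simp [pvCell]
      | succ i' =>
        have hne : (((i' + 1 : Nat) : Int) == 0) = false := by
          simp; omega
        rw [hne]
        simp only [Bool.false_eq_true, if_false]
        cases k with
        | zero => simp [pvCell]
        | succ k' =>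
          have hne2 : (((k' + 1 : Nat) : Int) == 0) = false := by simp; omega
          rw [hne2]
          simp only [Bool.false_eq_true, if_false]
          have hc1 : ((i' + 1 : Nat) : Int) - 1 = (i' : Nat) := by push_cast; ring
          have hc2 : ((k' + 1 : Nat) : Int) - 1 = (k' : Nat) := by push_cast; ring
          have hSprev : PySem.List.pyGetD S ((i' : Nat) : Int) [] = pvRowSpec str1 str2 i' nb := by
            have h1 : PySem.List.pyGetD M (((i' + 1 : Nat) : Int) - 1) []
                = pvRowSpec str1 str2 i' nb := by
              simpa using hprev (by omega)
            rw [hc1] at h1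
            rw [← h1]
            simp [hS, List.getD_eq_getElem?_getD, List.getElem?_set_ne (by omega : i' + 1 ≠ i')]
          rw [hc1, hc2, hSprev]
          have hget : PySem.List.pyGetD (pvRowSpec str1 str2 i' nb) ((k' : Nat) : Int) 0
              = pvCell str1 str2 i' k' := by
            simp [pvRowSpec, List.getD_eq_getElem?_getD, List.getElem?_map,
              List.getElem?_range (by omega : k' < nb + 1)]
          rw [hget]
          show _ = pvCell str1 str2 (i' + 1) (k' + 1)
          rw [pvCell]
          split_ifs <;> ring
    rw [hv]
    -- perform the write
    have hset : PySem.List.pySetD (pre ++ row.drop k) ((k : Nat) : Int) (pvCell str1 str2 i k)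
        = (List.range (k + 1)).map (fun j => pvCell str1 str2 i j) ++ row.drop (k + 1) := by
      rw [PySem.List.pySetD_natCast, List.set_append, if_neg (by omega)]
      rw [hprelen, Nat.sub_self, hdrop, List.set_cons_zero, List.range_succ, List.map_append]
      simp [hpre]
    rw [hset]
    simp [hS, List.set_set]

-- the outer loop replaces the zero rows by the spec rows, top to bottom
lemma pvOuter_fold (str1 str2 : String) (na nb : Nat) :
    ∀ i : Nat, i ≤ na + 1 →
      (PySem.List.pyRange 0 (i : Int) 1).foldl
        (fun M ii => (PySem.List.pyRange 0 ((nb : Int) + 1) 1).foldl (pvInner str1 str2 ii) M)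
        (List.replicate (na + 1) (List.replicate (nb + 1) (0 : Int)))
      = (List.range i).map (fun r => pvRowSpec str1 str2 r nb)
          ++ List.replicate (na + 1 - i) (List.replicate (nb + 1) (0 : Int)) := by
  intro i
  induction i with
  | zero => simp [PySem.List.pyRange_one_eq_nil]
  | succ i ih =>
    intro hi1
    have hi : i ≤ na := by omega
    have hic : ((i + 1 : Nat) : Int) = (i : Int) + 1 := by push_cast; ring
    rw [hic, PySem.List.pyRange_one_succ_right (a := 0) (b := (i : Int)) (by positivity),
      List.foldl_append, ih (by omega)]
    simp only [List.foldl_cons, List.foldl_nil]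
    set Mi := (List.range i).map (fun r => pvRowSpec str1 str2 r nb)
          ++ List.replicate (na + 1 - i) (List.replicate (nb + 1) (0 : Int)) with hMi
    have hlenM : Mi.length = na + 1 := by simp [hMi]; omega
    have hiM : i < Mi.length := by omega
    have hrowi : PySem.List.pyGetD Mi (i : Int) [] = List.replicate (nb + 1) (0 : Int) := by
      simp only [PySem.List.pyGetD_natCast, hMi, List.getD_eq_getElem?_getD]
      rw [List.getElem?_append_right (by simp)]
      simp [hi]
    have hprev : 1 ≤ i → PySem.List.pyGetD Mi ((i : Int) - 1) [] = pvRowSpec str1 str2 (i - 1) nb := by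
      intro h1
      have hc : ((i : Int) - 1) = ((i - 1 : Nat) : Int) := by omega
      rw [hc]
      simp only [PySem.List.pyGetD_natCast, hMi, List.getD_eq_getElem?_getD]
      rw [List.getElem?_append_left (by simp; omega)]
      simp [List.getElem?_range (by omega : i - 1 < i)]
    have hnb1 : ((nb : Int) + 1) = ((nb + 1 : Nat) : Int) := by push_cast; ring
    rw [hnb1, pvInner_fold str1 str2 nb i Mi hiM hprev (by rw [hrowi]; simp) (nb + 1) le_rfl]
    rw [hrowi]
    rw [List.drop_replicate]
    simp only [Nat.sub_self, List.replicate_zero, List.append_nil]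
    have hrep : List.replicate (na + 1 - i) (List.replicate (nb + 1) (0 : Int))
        = List.replicate (nb + 1) (0 : Int) :: List.replicate (na - i) (List.replicate (nb + 1) (0 : Int)) := by
      rw [show na + 1 - i = (na - i) + 1 by omega, List.replicate_succ]
    rw [hMi, hrep, List.set_append, if_neg (by simp), List.length_map, List.length_range,
      Nat.sub_self, List.set_cons_zero, List.range_succ, List.map_append]
    simp [pvRowSpec, List.range_succ]

-- B's running sum as a mapped sum
lemma pvMsum_eq (l : List (Char × Char)) :
    l.foldl (fun acc p => acc + (if p.1 ≠ p.2 then (1 : Int) else 0)) 0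
      = (l.map (fun p => if p.1 ≠ p.2 then (1 : Int) else 0)).sum := by
  simpa using PySem.List.foldl_add (l := l) (a := 0)
    (g := fun p : Char × Char => if p.1 ≠ p.2 then (1 : Int) else 0)

theorem main_eq (str1 str2 : String) :
    levenshtein_distance_replacement str1 str2 = levenshtein_distance_replacement_alt str1 str2 := by
  have hlen1 : PySem.Str.len str1 = (str1.toList.length : Int) := by simp
  have hlen2 : PySem.Str.len str2 = (str2.toList.length : Int) := by simp
  set na := str1.toList.length with hna
  set nb := str2.toList.length with hnb
  simp only [levenshtein_distance_replacement, levenshtein_distance_replacement_alt,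
    hlen1, hlen2]
  have hM0 : (PySem.List.pyRange 0 ((na : Int) + 1) 1).map
        (fun _ => (PySem.List.pyRange 0 ((nb : Int) + 1) 1).map (fun _ => (0 : Int)))
      = List.replicate (na + 1) (List.replicate (nb + 1) (0 : Int)) := by
    rw [List.map_const', List.map_const']
    simp [PySem.List.length_pyRange_one]
  rw [hM0]
  have h1 : ((na : Int) + 1) = ((na + 1 : Nat) : Int) := by push_cast; ring
  rw [h1, pvOuter_fold str1 str2 na nb (na + 1) le_rfl]
  simp only [Nat.sub_self, List.replicate_zero, List.append_nil]
  rw [List.range_succ, List.map_append, List.map_singleton,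
    PySem.List.pyGetD_neg_one_append_singleton]
  have hrow : pvRowSpec str1 str2 na nb
      = (List.range nb).map (fun j => pvCell str1 str2 na j) ++ [pvCell str1 str2 na nb] := by
    rw [pvRowSpec, List.range_succ, List.map_append, List.map_singleton]
  rw [hrow, PySem.List.pyGetD_neg_one_append_singleton]
  rw [pvCell_closed str1 str2 na nb le_rfl le_rfl]
  rw [pvMsum_eq, hna, hnb, List.take_length, List.take_length]

-- ===== VERDICT (by name: the statement is the Claim_ definition above) =====
theorem levenshtein_distance_replacement_spec : Claim_equal_levenshtein_distance_replacement := by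
  intro str1 str2 _
  unfold Spec_levenshtein_distance_replacement
  exact main_eq str1 str2
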